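-- pv_equiv track=rewrite | github.com/clarkvoss/Tamper-Scripts | MSSQL_Baraacuda.py | encode_characters
-- ===== SOURCE A (Python) =====
-- def encode_characters(payload):
--     """
--     Encodes sensitive characters to bypass input filtering.
--     """
--     char_map = {
--         "'": "%27",
--         "\"": "%22",
--         "--": "%2D%2D",
--         ";": "%3B",
--         " ": "%20",
--         "=": "%3D"
--     }
--     for char, encoded in char_map.items():
--         payload = payload.replace(char, encoded)
--     return payload
-- ===== SOURCE B (Python) =====
-- def encode_characters(payload):
--     """
--     Encodes sensitive characters to bypass input filtering.
--     Single left-to-right pass instead of six sequential .replace() rescans.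
--     """
--     single = {"'": "%27", '"': "%22", ";": "%3B", " ": "%20", "=": "%3D"}
--     out = []
--     i = 0
--     n = len(payload)
--     while i < n:
--         if payload.startswith("--", i):
--             out.append("%2D%2D")
--             i += 2
--         else:
--             c = payload[i]
--             out.append(single.get(c, c))
--             i += 1
--     return "".join(out)
-- ===== Notes on version B (the rewrite author's own statement) =====
-- stated objective: alternative
-- what changed: Replaces the chain of six sequential str.replace rescans with a single left-to-right scan that tries the two-character dash token first and otherwise maps the current character through a dict, joining the pieces once; fewer passes, but plain-Python iteration is not faster than C-level str.replace.
import Mathlib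
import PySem

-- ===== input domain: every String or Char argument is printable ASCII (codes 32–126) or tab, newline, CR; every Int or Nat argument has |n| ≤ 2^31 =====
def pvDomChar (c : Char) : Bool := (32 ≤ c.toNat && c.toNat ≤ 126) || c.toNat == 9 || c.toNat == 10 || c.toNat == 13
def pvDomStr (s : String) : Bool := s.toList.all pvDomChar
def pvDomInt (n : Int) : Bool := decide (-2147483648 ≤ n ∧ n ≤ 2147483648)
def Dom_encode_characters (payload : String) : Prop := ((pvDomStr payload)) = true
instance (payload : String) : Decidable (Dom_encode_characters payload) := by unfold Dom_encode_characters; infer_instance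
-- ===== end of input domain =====

-- B replaces A's chain of six sequential str.replace passes by one left-to-right scan
-- (the two-character dash token tried first, then a per-character map); an alternative
-- single-pass algorithm, proved to return the same string on all inputs.

-- ===== PORT A =====
def encode_characters (payload : String) : String :=
  -- for char, encoded in char_map.items(): payload = payload.replace(char, encoded)
  let p1 := PySem.Str.replace payload "'" "%27"
  let p2 := PySem.Str.replace p1 "\"" "%22"
  let p3 := PySem.Str.replace p2 "--" "%2D%2D"
  let p4 := PySem.Str.replace p3 ";" "%3B"
  let p5 := PySem.Str.replace p4 " " "%20"
  PySem.Str.replace p5 "=" "%3D"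

-- ===== PORT B =====
-- single.get(c, c) of Source B
def encStep (c : Char) : List Char :=
  if c = '\'' then "%27".toList
  else if c = '"' then "%22".toList
  else if c = ';' then "%3B".toList
  else if c = ' ' then "%20".toList
  else if c = '=' then "%3D".toList
  else [c]

-- the while-loop of Source B: payload.startswith("--", i) first, else map payload[i]
def encGo (l : List Char) : List Char :=
  match l with
  | [] => []
  | c :: t =>
    if c = '-' ∧ t.head? = some '-' then "%2D%2D".toList ++ encGo t.tail
    else encStep c ++ encGo t
termination_by l.length
decreasing_by all_goals simp [List.length_tail]

def encode_characters_alt (payload : String) : String :=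
  String.ofList (encGo payload.toList)

-- ===== PRECONDITION & SPEC =====
def Spec_encode_characters (payload : String) (out : String) : Prop := out = encode_characters_alt payload
instance (payload : String) (out : String) : Decidable (Spec_encode_characters payload out) := by unfold Spec_encode_characters; infer_instance

-- ===== CLAIM (what is proved, stated in full; the proofs are below) =====
def Claim_equal_encode_characters : Prop := ∀ (payload : String), Dom_encode_characters payload → Spec_encode_characters payload (encode_characters payload)

-- ===== LEMMAS AND PROOFS =====

-- one single-character substitution, as a per-character function
def sub1 (a : Char) (w : List Char) (c : Char) : List Char := if c = a then w else [c]

-- effect of A's "--" replace, as a structural recursion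
def ddRep (l : List Char) : List Char :=
  match l with
  | [] => []
  | c :: t =>
    if c = '-' ∧ t.head? = some '-' then "%2D%2D".toList ++ ddRep t.tail
    else c :: ddRep t
termination_by l.length
decreasing_by all_goals simp [List.length_tail]

-- combined effect of the first two replaces / of the last three replaces
def e12 (c : Char) : List Char :=
  if c = '\'' then "%27".toList else if c = '"' then "%22".toList else [c]
def e456 (c : Char) : List Char :=
  if c = ';' then "%3B".toList else if c = ' ' then "%20".toList
  else if c = '=' then "%3D".toList else [c]

theorem go_single (a : Char) (w : List Char) :
    ∀ fuel (l acc : List Char), l.length ≤ fuel →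
      PySem.Chars.replace.go [a] w fuel l acc = acc.reverse ++ l.flatMap (sub1 a w) := by
  intro fuel
  induction fuel with
  | zero =>
    intro l acc h
    have : l = [] := List.eq_nil_of_length_eq_zero (Nat.le_zero.mp h)
    subst this; rw [PySem.Chars.replace.go]; simp
  | succ f ih =>
    intro l acc h
    cases l with
    | nil => rw [PySem.Chars.replace.go]; simp; all_goals omega
    | cons c t =>
      rw [PySem.Chars.replace.go]
      simp only [List.isPrefixOf, List.flatMap_cons, Bool.and_true]
      by_cases hc : a = c
      · rw [if_pos (by simp [hc])]
        rw [ih _ _ (by simp at h ⊢; omega)]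
        simp [sub1, hc.symm]
      · rw [if_neg (by simp [hc])]
        rw [ih _ _ (by simp at h; omega)]
        have hca : c ≠ a := fun h' => hc h'.symm
        simp [sub1, hca]

theorem replace_single (s : List Char) (a : Char) (w : List Char) :
    PySem.Chars.replace s [a] w = s.flatMap (sub1 a w) := by
  rw [PySem.Chars.replace]
  simp only [List.isEmpty_cons, if_neg Bool.false_ne_true]
  simpa using go_single a w s.length s [] le_rfl

theorem ddRep_nil : ddRep [] = [] := by rw [ddRep.eq_def]

theorem ddRep_dd (t : List Char) :
    ddRep ('-' :: '-' :: t) = "%2D%2D".toList ++ ddRep t := by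
  rw [ddRep.eq_def]; simp

theorem ddRep_cons (c : Char) (t : List Char) (h : ¬(c = '-' ∧ t.head? = some '-')) :
    ddRep (c :: t) = c :: ddRep t := by
  rw [ddRep.eq_def]; simp [h]

theorem go_dd :
    ∀ fuel (l acc : List Char), l.length ≤ fuel →
      PySem.Chars.replace.go ['-', '-'] "%2D%2D".toList fuel l acc = acc.reverse ++ ddRep l := by
  intro fuel
  induction fuel with
  | zero =>
    intro l acc h
    have : l = [] := List.eq_nil_of_length_eq_zero (Nat.le_zero.mp h)
    subst this; rw [PySem.Chars.replace.go]; simp [ddRep_nil]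
  | succ f ih =>
    intro l acc h
    cases l with
    | nil => rw [PySem.Chars.replace.go]; simp [ddRep_nil]; all_goals omega
    | cons c t =>
      rw [PySem.Chars.replace.go]
      by_cases hp : List.isPrefixOf ['-', '-'] (c :: t) = true
      · rw [if_pos hp]
        rcases (List.isPrefixOf_iff_prefix.mp hp) with ⟨r, hr⟩
        cases t with
        | nil => simp at hr
        | cons c2 t2 =>
          have hc : c = '-' := by simpa using congrArg (·.head?) hr.symm
          have hc2 : c2 = '-' := by
            have := congrArg (fun x => (x.tail).head?) hr.symm
            simpa using this
          subst hc; subst hc2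
          rw [ddRep_dd]
          have hlen : t2.length ≤ f := by simp at h; omega
          rw [show List.drop (['-', '-'] : List Char).length ('-' :: '-' :: t2) = t2 by simp]
          rw [ih _ _ hlen]
          simp
      · rw [if_neg hp]
        have hnot : ¬(c = '-' ∧ t.head? = some '-') := by
          rintro ⟨hc, ht⟩
          subst hc
          cases t with
          | nil => simp at ht
          | cons c2 t2 =>
            have : c2 = '-' := by simpa using ht
            subst this
            exact hp (by simp [List.isPrefixOf])
        rw [ddRep_cons c t hnot]
        rw [ih _ _ (by simp at h; omega)]
        simp

theorem replace_dd (s : List Char) :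
    PySem.Chars.replace s ['-', '-'] "%2D%2D".toList = ddRep s := by
  rw [PySem.Chars.replace]
  simp only [List.isEmpty_cons, if_neg Bool.false_ne_true]
  simpa using go_dd s.length s [] le_rfl

theorem comp12 (l : List Char) :
    (l.flatMap (sub1 '\'' "%27".toList)).flatMap (sub1 '"' "%22".toList) = l.flatMap e12 := by
  induction l with
  | nil => simp
  | cons c t ih =>
    simp only [List.flatMap_cons, List.flatMap_append, ih]
    congr 1
    by_cases h1 : c = '\''
    · subst h1; decide
    · by_cases h2 : c = '"'
      · subst h2; decide
      · simp [sub1, e12, h1, h2]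

theorem comp456 (l : List Char) :
    ((l.flatMap (sub1 ';' "%3B".toList)).flatMap (sub1 ' ' "%20".toList)).flatMap
        (sub1 '=' "%3D".toList) = l.flatMap e456 := by
  induction l with
  | nil => simp
  | cons c t ih =>
    simp only [List.flatMap_cons, List.flatMap_append, ih]
    congr 1
    by_cases h1 : c = ';'
    · subst h1; decide
    · by_cases h2 : c = ' '
      · subst h2; decide
      · by_cases h3 : c = '='
        · subst h3; decide
        · simp [sub1, e456, h1, h2, h3]

theorem ddRep_append_nodash (u v : List Char) (h : '-' ∉ u) :
    ddRep (u ++ v) = u ++ ddRep v := by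
  induction u with
  | nil => simp
  | cons a u' ih =>
    have ha : a ≠ '-' := fun he => h (he ▸ List.mem_cons_self ..)
    rw [List.cons_append, ddRep_cons _ _ (fun hc => ha hc.1)]
    rw [ih (fun hm => h (List.mem_cons_of_mem _ hm))]
    simp

theorem head_flatMap_e12 (t : List Char) :
    (t.flatMap e12).head? = some '-' ↔ t.head? = some '-' := by
  cases t with
  | nil => simp
  | cons c2 t2 =>
    by_cases h1 : c2 = '\''
    · subst h1; simp [e12]
    · by_cases h2 : c2 = '"'
      · subst h2; simp [e12, h1]
      · simp [e12, h1, h2]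

theorem encStep_of_plain (c : Char) (h1 : c ≠ '\'') (h2 : c ≠ '"') :
    encStep c = e456 c := by
  simp [encStep, e456, h1, h2]

theorem main_list (l : List Char) :
    (ddRep (l.flatMap e12)).flatMap e456 = encGo l := by
  induction l using encGo.induct with
  | case1 => simp [ddRep_nil, encGo]
  | case2 c t h ih =>
    obtain ⟨hc, ht⟩ := h
    subst hc
    cases t with
    | nil => simp at ht
    | cons c2 t2 =>
      have hc2 : c2 = '-' := by simpa using ht
      subst hc2
      rw [show encGo ('-' :: '-' :: t2) = "%2D%2D".toList ++ encGo t2 by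
        rw [encGo.eq_def]; simp]
      simp only [List.flatMap_cons]
      rw [show e12 '-' = ['-'] from rfl]
      rw [show (['-'] ++ (['-'] ++ t2.flatMap e12)) = '-' :: '-' :: t2.flatMap e12 from rfl]
      rw [ddRep_dd, List.flatMap_append]
      rw [show ("%2D%2D".toList.flatMap e456) = "%2D%2D".toList from rfl]
      simpa using ih
  | case3 c t h ih =>
    rw [show encGo (c :: t) = encStep c ++ encGo t by rw [encGo.eq_def]; simp [h]]
    simp only [List.flatMap_cons]
    by_cases h1 : c = '\''
    · subst h1
      rw [show e12 '\'' = "%27".toList from rfl]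
      rw [ddRep_append_nodash _ _ (by decide), List.flatMap_append]
      rw [show ("%27".toList.flatMap e456) = "%27".toList from rfl]
      rw [show encStep '\'' = "%27".toList from rfl, ih]
    · by_cases h2 : c = '"'
      · subst h2
        rw [show e12 '"' = "%22".toList from rfl]
        rw [ddRep_append_nodash _ _ (by decide), List.flatMap_append]
        rw [show ("%22".toList.flatMap e456) = "%22".toList from rfl]
        rw [show encStep '"' = "%22".toList from rfl, ih]
      · rw [show e12 c = [c] by simp [e12, h1, h2]]
        by_cases hd : c = '-'
        · subst hd
          have hth : (t.flatMap e12).head? ≠ some '-' :=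
            fun hh => h ⟨rfl, (head_flatMap_e12 t).mp hh⟩
          rw [show (['-'] ++ t.flatMap e12) = '-' :: t.flatMap e12 from rfl]
          rw [ddRep_cons _ _ (fun hc => hth hc.2)]
          simp only [List.flatMap_cons]
          rw [show e456 '-' = ['-'] from rfl, show encStep '-' = ['-'] from rfl, ih]
        · rw [show ([c] ++ t.flatMap e12) = c :: t.flatMap e12 from rfl]
          rw [ddRep_cons _ _ (fun hc => hd hc.1)]
          simp only [List.flatMap_cons]
          rw [encStep_of_plain c h1 h2, ih]

-- ===== VERDICT (by name: the statement is the Claim_ definition above) =====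
theorem encode_characters_spec : Claim_equal_encode_characters := by
  intro payload _
  show _ = _
  unfold encode_characters encode_characters_alt
  simp only [PySem.Str.replace, String.toList_ofList]
  congr 1
  rw [show ("'".toList : List Char) = ['\''] from rfl,
      show ("\"".toList : List Char) = ['"'] from rfl,
      show ("--".toList : List Char) = ['-', '-'] from rfl,
      show (";".toList : List Char) = [';'] from rfl,
      show (" ".toList : List Char) = [' '] from rfl,
      show ("=".toList : List Char) = ['='] from rfl]
  rw [replace_single, replace_single, replace_dd, replace_single, replace_single,
      replace_single]
  rw [comp12, comp456, main_list]
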